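-- pv_equiv track=rewrite | github.com/accountcf/cisco_NetMiKo | switch_manager.py | find_ports_in_vlan
-- ===== SOURCE A (Python) =====
-- from typing import List, Tuple, Optional, Dict, Any
--
-- def find_ports_in_vlan(parsed_mac_table: List[Dict[str, str]], source_vlan: str) -> List[str]:
--     source_vlan_lower = source_vlan.lower()
--     ports = set()
--     for entry in parsed_mac_table:
--         if entry.get('vlan') == source_vlan_lower:
--             port = entry.get('port')
--             if port:
--                 ports.add(port)
--     return sorted(list(ports))
-- ===== SOURCE B (Python) =====
-- def _insert_unique(p, lst):
--     # insert p into sorted-unique list lst, keeping it sorted and duplicate-free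
--     out = []
--     i = 0
--     while i < len(lst) and lst[i] < p:
--         out.append(lst[i])
--         i += 1
--     if i < len(lst) and lst[i] == p:
--         return lst
--     out.append(p)
--     out.extend(lst[i:])
--     return out
--
-- def find_ports_in_vlan(parsed_mac_table, source_vlan):
--     svl = source_vlan.lower()
--     result = []
--     for entry in parsed_mac_table:
--         if entry.get('vlan') == svl:
--             p = entry.get('port')
--             if p:
--                 result = _insert_unique(p, result)
--     return result
-- ===== Notes on version B (the rewrite author's own statement) =====
-- stated objective: alternative
-- what changed: Single pass that maintains the answer as a sorted duplicate-free list via ordered insertion (insertion-sort with dedup on the fly), eliminating both the hash set and the final sorted() call.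
import Mathlib
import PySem

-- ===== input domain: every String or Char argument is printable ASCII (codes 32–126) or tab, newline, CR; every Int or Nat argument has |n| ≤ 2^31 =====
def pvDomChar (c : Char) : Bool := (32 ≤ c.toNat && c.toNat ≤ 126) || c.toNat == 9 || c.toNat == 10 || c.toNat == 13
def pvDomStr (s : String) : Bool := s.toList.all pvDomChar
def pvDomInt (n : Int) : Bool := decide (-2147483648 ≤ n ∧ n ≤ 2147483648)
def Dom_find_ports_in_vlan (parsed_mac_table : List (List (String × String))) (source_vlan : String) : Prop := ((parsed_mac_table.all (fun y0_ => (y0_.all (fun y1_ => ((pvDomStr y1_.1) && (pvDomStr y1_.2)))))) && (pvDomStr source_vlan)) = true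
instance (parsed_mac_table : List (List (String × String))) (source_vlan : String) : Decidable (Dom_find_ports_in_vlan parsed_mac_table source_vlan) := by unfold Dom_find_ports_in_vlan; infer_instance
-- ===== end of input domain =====

-- B keeps the answer as a sorted duplicate-free list and inserts each matching port in
-- order during the single scan (insertion with dedup), so it needs neither a set nor a
-- final sort; A accumulates a set and sorts it at the end.

-- ===== PORT A =====
def find_ports_in_vlan (parsed_mac_table : List (List (String × String))) (source_vlan : String) : List String :=
  let source_vlan_lower := PySem.Str.lower source_vlan
  let ports : PySem.Set String := parsed_mac_table.foldl (fun ports entry =>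
    if PySem.Dict.get? (PySem.Dict.mk entry) "vlan" == some source_vlan_lower then
      match PySem.Dict.get? (PySem.Dict.mk entry) "port" with
      | some port => if port != "" then PySem.Set.add ports port else ports  -- 'if port:' — a present string is truthy iff nonempty
      | none => ports
    else ports) PySem.Set.empty
  PySem.List.sorted ports (fun x => x) false

-- ===== PORT B =====
-- Source B's _insert_unique: its while loop copies the prefix of elements < p, then either
-- finds p already present (returns the list unchanged) or splices p in; the structural
-- recursion below consumes that same prefix element by element.
def insertUnique (p : String) : List String → List String
  | [] => [p]
  | x :: t => if x < p then x :: insertUnique p t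
              else if x == p then x :: t
              else p :: x :: t

def find_ports_in_vlan_alt (parsed_mac_table : List (List (String × String))) (source_vlan : String) : List String :=
  let svl := PySem.Str.lower source_vlan
  parsed_mac_table.foldl (fun result entry =>
    if PySem.Dict.get? (PySem.Dict.mk entry) "vlan" == some svl then
      match PySem.Dict.get? (PySem.Dict.mk entry) "port" with
      | some p => if p != "" then insertUnique p result else result
      | none => result
    else result) []

-- ===== PRECONDITION & SPEC =====
def Spec_find_ports_in_vlan (parsed_mac_table : List (List (String × String))) (source_vlan : String) (out : List String) : Prop := out = find_ports_in_vlan_alt parsed_mac_table source_vlan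
instance (parsed_mac_table : List (List (String × String))) (source_vlan : String) (out : List String) : Decidable (Spec_find_ports_in_vlan parsed_mac_table source_vlan out) := by unfold Spec_find_ports_in_vlan; infer_instance

-- ===== CLAIM =====
def Claim_equal_find_ports_in_vlan : Prop := ∀ (parsed_mac_table : List (List (String × String))) (source_vlan : String), Dom_find_ports_in_vlan parsed_mac_table source_vlan → Spec_find_ports_in_vlan parsed_mac_table source_vlan (find_ports_in_vlan parsed_mac_table source_vlan)

-- ===== LEMMAS AND PROOFS =====

-- the common per-entry condition and projection both loops reduce to
def pvCond (svl : String) (e : List (String × String)) : Bool :=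
  (PySem.Dict.get? (PySem.Dict.mk e) "vlan" == some svl)
    && ((PySem.Dict.get? (PySem.Dict.mk e) "port").getD "" != "")
def pvPort (e : List (String × String)) : String := (PySem.Dict.get? (PySem.Dict.mk e) "port").getD ""

theorem insertUnique_mem (p y : String) (l : List String) :
    y ∈ insertUnique p l ↔ y = p ∨ y ∈ l := by
  induction l with
  | nil => simp [insertUnique]
  | cons x t ih =>
      by_cases h1 : x < p
      · simp [insertUnique, h1, ih, or_left_comm]
      · by_cases h2 : x = p
        · subst h2; simp [insertUnique]
        · simp [insertUnique, h1, h2]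

theorem insertUnique_pairwise (p : String) (l : List String)
    (h : l.Pairwise (· < ·)) : (insertUnique p l).Pairwise (· < ·) := by
  induction l with
  | nil => simp [insertUnique]
  | cons x t ih =>
      rcases List.pairwise_cons.mp h with ⟨hx, ht⟩
      by_cases h1 : x < p
      · rw [insertUnique, if_pos h1]
        refine List.pairwise_cons.mpr ⟨?_, ih ht⟩
        intro y hy
        rcases (insertUnique_mem p y t).mp hy with rfl | hyt
        · exact h1
        · exact hx y hyt
      · by_cases h2 : x = p
        · subst h2; rw [insertUnique, if_neg h1]; simpa using h
        · rw [insertUnique, if_neg h1, if_neg (by simpa using h2)]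
          refine List.pairwise_cons.mpr ⟨?_, h⟩
          intro y hy
          have hpx : p < x := lt_of_le_of_ne (not_lt.mp h1) (Ne.symm h2)
          rcases List.mem_cons.mp hy with rfl | hyt
          · exact hpx
          · exact lt_trans hpx (hx y hyt)

-- folding insertUnique over ms keeps the accumulator sorted-unique and adds ms's members
theorem pv_fold_insertUnique (ms : List String) :
    ∀ acc : List String, acc.Pairwise (· < ·) →
      (ms.foldl (fun r p => insertUnique p r) acc).Pairwise (· < ·) ∧
      (∀ y, y ∈ ms.foldl (fun r p => insertUnique p r) acc ↔ y ∈ acc ∨ y ∈ ms) := by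
  induction ms with
  | nil => intro acc h; simpa using h
  | cons p t ih =>
      intro acc h
      obtain ⟨h1, h2⟩ := ih (insertUnique p acc) (insertUnique_pairwise p acc h)
      refine ⟨h1, fun y => ?_⟩
      simp only [List.foldl_cons] at *
      rw [h2 y, insertUnique_mem]
      simp [or_assoc, or_comm, or_left_comm]

-- incremental ordered insertion over any list equals sorted(set(...)) of it
theorem pv_insert_sorted (ms : List String) :
    ms.foldl (fun r p => insertUnique p r) []
      = PySem.List.sorted (PySem.Set.ofList ms) (fun x => x) false := by
  obtain ⟨hpw, hmem⟩ := pv_fold_insertUnique ms [] (by simp)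
  have hnd : (ms.foldl (fun r p => insertUnique p r) []).Nodup :=
    hpw.imp (fun h => ne_of_lt h)
  refine (PySem.List.sorted_eq_of_perm_of_pairwise_lt _ _ _ ?_ hpw).symm
  refine (List.perm_ext_iff_of_nodup hnd (PySem.Set.nodup_ofList _)).mpr fun y => ?_
  rw [hmem y]
  simp [PySem.Set.mem_ofList]

-- A's loop builds exactly set(ms) where ms is the list of matching ports in scan order
theorem pv_A_fold (t : List (List (String × String))) (svl : String) :
    t.foldl (fun ports entry =>
      if PySem.Dict.get? (PySem.Dict.mk entry) "vlan" == some svl then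
        match PySem.Dict.get? (PySem.Dict.mk entry) "port" with
        | some port => if port != "" then PySem.Set.add ports port else ports
        | none => ports
      else ports) PySem.Set.empty
    = PySem.Set.ofList ((t.filter (pvCond svl)).map pvPort) := by
  have h1 : t.foldl (fun ports entry =>
      if PySem.Dict.get? (PySem.Dict.mk entry) "vlan" == some svl then
        match PySem.Dict.get? (PySem.Dict.mk entry) "port" with
        | some port => if port != "" then PySem.Set.add ports port else ports
        | none => ports
      else ports) PySem.Set.empty
      = t.foldl (fun ports entry => if pvCond svl entry then PySem.Set.add ports (pvPort entry) else ports) PySem.Set.empty := by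
    apply PySem.List.foldl_congr_mem
    intro acc e _
    unfold pvCond pvPort
    rcases PySem.Dict.get? (PySem.Dict.mk e) "port" with _ | port
    · simp
    · by_cases hp : port = "" <;> simp [hp]
  rw [h1, PySem.List.foldl_if_eq_foldl_filter, PySem.Set.ofList_eq_foldl, List.foldl_map]
  rfl

-- B's loop is the insertUnique fold over that same list of matching ports
theorem pv_B_fold (t : List (List (String × String))) (svl : String) :
    t.foldl (fun result entry =>
      if PySem.Dict.get? (PySem.Dict.mk entry) "vlan" == some svl then
        match PySem.Dict.get? (PySem.Dict.mk entry) "port" with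
        | some p => if p != "" then insertUnique p result else result
        | none => result
      else result) []
    = ((t.filter (pvCond svl)).map pvPort).foldl (fun r p => insertUnique p r) [] := by
  have h1 : t.foldl (fun result entry =>
      if PySem.Dict.get? (PySem.Dict.mk entry) "vlan" == some svl then
        match PySem.Dict.get? (PySem.Dict.mk entry) "port" with
        | some p => if p != "" then insertUnique p result else result
        | none => result
      else result) []
      = t.foldl (fun result entry => if pvCond svl entry then insertUnique (pvPort entry) result else result) [] := by
    apply PySem.List.foldl_congr_mem
    intro acc e _
    unfold pvCond pvPort
    rcases PySem.Dict.get? (PySem.Dict.mk e) "port" with _ | port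
    · simp
    · by_cases hp : port = "" <;> simp [hp]
  rw [h1, PySem.List.foldl_if_eq_foldl_filter, List.foldl_map]

-- ===== VERDICT =====
theorem find_ports_in_vlan_spec : Claim_equal_find_ports_in_vlan := by
  intro t sv _
  unfold Spec_find_ports_in_vlan find_ports_in_vlan find_ports_in_vlan_alt
  dsimp only
  rw [pv_A_fold, pv_B_fold, pv_insert_sorted]
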